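-- pv_equiv track=rewrite | github.com/hundong2/git-game | git-learning-game/backend/game_engine.py | _extract_command_segments
-- ===== SOURCE A (Python) =====
-- import shlex
-- from typing import Dict, List, Any, Optional
--
-- def _extract_command_segments(command: str) -> List[List[str]]:
--     """Split a shell command into segments based on shell operators."""
--     try:
--         tokens = shlex.split(command, posix=True)
--     except ValueError:
--         return []
--
--     segments: List[List[str]] = []
--     current: List[str] = []
--     separators = {"|", "&&", "||", ";"}
--
--     for token in tokens:
--         if token in separators:
--             if current:
--                 segments.append(current)
--                 current = []
--             continue
--         current.append(token)
--
--     if current: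
--         segments.append(current)
--
--     return segments
-- ===== SOURCE B (Python) =====
-- from typing import List, Tuple
--
-- _SEPARATORS = {"|", "&&", "||", ";"}
--
-- _WS = " \t\r\n"
--
--
-- def _read_double_quoted(s: str, i: int) -> Tuple[str, int]:
--     """Read up to the closing double quote.  Inside double quotes a backslash
--     escapes only a backslash or a double quote; before any other character it
--     stays literal.  Raises ValueError on an unterminated quote or escape."""
--     parts = []
--     n = len(s)
--     while i < n:
--         c = s[i]
--         if c == '"':
--             return "".join(parts), i + 1
--         if c == "\\":
--             if i + 1 >= n:
--                 raise ValueError("no escaped character")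
--             d = s[i + 1]
--             parts.append(d if d in '\\"' else "\\" + d)
--             i += 2
--         else:
--             parts.append(c)
--             i += 1
--     raise ValueError("no closing quotation")
--
--
-- def _read_word(s: str, i: int) -> Tuple[str, int]:
--     """Read one shell word starting at a non-blank position: a run of plain
--     characters, single-quoted literals, double-quoted chunks and
--     backslash-escaped characters, ending at unquoted whitespace."""
--     parts = []
--     n = len(s)
--     while i < n and s[i] not in _WS:
--         c = s[i]
--         if c == "'":
--             j = s.find("'", i + 1)
--             if j < 0:
--                 raise ValueError("no closing quotation")
--             parts.append(s[i + 1:j])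
--             i = j + 1
--         elif c == '"':
--             chunk, i = _read_double_quoted(s, i + 1)
--             parts.append(chunk)
--         elif c == "\\":
--             if i + 1 >= n:
--                 raise ValueError("no escaped character")
--             parts.append(s[i + 1])
--             i += 2
--         else:
--             parts.append(c)
--             i += 1
--     return "".join(parts), i
--
--
-- def _tokenize(command: str) -> List[str]:
--     """POSIX shell word splitting: blanks separate words; quotes and
--     backslashes group characters into one word."""
--     tokens = []
--     i, n = 0, len(command)
--     while i < n:
--         if command[i] in _WS:
--             i += 1
--         else:
--             word, i = _read_word(command, i)
--             tokens.append(word)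
--     return tokens
--
--
-- def _segments_of(tokens: List[str]) -> List[List[str]]:
--     """Skip a leading separator, or slice off the first maximal run of
--     non-separator tokens; recurse on the remainder."""
--     if not tokens:
--         return []
--     if tokens[0] in _SEPARATORS:
--         return _segments_of(tokens[1:])
--     j = 1
--     while j < len(tokens) and tokens[j] not in _SEPARATORS:
--         j += 1
--     return [tokens[:j]] + _segments_of(tokens[j:])
--
--
-- def _extract_command_segments(command: str) -> List[List[str]]:
--     """Split a shell command into segments based on shell operators."""
--     try:
--         tokens = _tokenize(command)
--     except ValueError:
--         return []
--     return _segments_of(tokens)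
-- ===== Notes on version B (the rewrite author's own statement) =====
-- stated objective: alternative
-- what changed: A calls shlex.split and accumulates segments with a running-list state machine in one loop over the tokens; B tokenizes by recursive descent (word reader with quote/escape sub-readers over string indices) and builds segments by recursively slicing off each maximal non-separator run of tokens.
import Mathlib
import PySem

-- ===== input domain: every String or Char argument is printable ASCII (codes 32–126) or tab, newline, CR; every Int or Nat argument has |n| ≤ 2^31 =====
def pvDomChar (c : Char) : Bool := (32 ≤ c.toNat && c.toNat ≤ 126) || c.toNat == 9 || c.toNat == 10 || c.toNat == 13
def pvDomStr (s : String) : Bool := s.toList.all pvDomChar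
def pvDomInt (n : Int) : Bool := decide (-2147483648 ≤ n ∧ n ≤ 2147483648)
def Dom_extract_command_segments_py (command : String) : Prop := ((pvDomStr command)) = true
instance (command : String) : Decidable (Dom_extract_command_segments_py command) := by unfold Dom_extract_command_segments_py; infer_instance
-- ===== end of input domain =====

-- B tokenizes by recursive descent instead of A's shlex state machine, and builds the
-- segments by recursively slicing off each maximal non-separator run instead of A's
-- running-accumulator loop (objective: alternative; a timing run measured B faster).

-- ===== PORT A =====

-- Hand-written port of shlex.split(command, posix=True) with shlex.split's defaults
-- (whitespace_split=True, comments=False, no punctuation_chars); exact on the ASCII domain: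
-- states ' ' / 'a' / inside-'\'' / inside-'"' / escape-from-'a' / escape-from-'"' of
-- shlex.shlex.read_token; none = ValueError (unclosed quote / trailing escape).
inductive PvLexState where
  | s | a | qS | qD | eA | eQ
deriving DecidableEq, Repr

def pvIsWs (c : Char) : Bool := c = ' ' || c = '\t' || c = '\r' || c = '\n'

def pvLex : List Char → PvLexState → List Char → Bool → Option (List String)
  | [], .s, _, _ => some []
  | [], .a, cur, quoted =>
      some (if cur ≠ [] ∨ quoted then [String.ofList cur] else [])
  | [], .qS, _, _ => none
  | [], .qD, _, _ => none
  | [], .eA, _, _ => none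
  | [], .eQ, _, _ => none
  | c :: cs, .s, cur, quoted =>
      if pvIsWs c then pvLex cs .s cur quoted
      else if c = '\'' then pvLex cs .qS cur true
      else if c = '"' then pvLex cs .qD cur true
      else if c = '\\' then pvLex cs .eA cur quoted
      else pvLex cs .a (cur ++ [c]) quoted
  | c :: cs, .a, cur, quoted =>
      if pvIsWs c then
        (pvLex cs .s [] false).map
          (fun rest => if cur ≠ [] ∨ quoted then String.ofList cur :: rest else rest)
      else if c = '\'' then pvLex cs .qS cur true
      else if c = '"' then pvLex cs .qD cur true
      else if c = '\\' then pvLex cs .eA cur quoted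
      else pvLex cs .a (cur ++ [c]) quoted
  | c :: cs, .qS, cur, quoted =>
      if c = '\'' then pvLex cs .a cur quoted
      else pvLex cs .qS (cur ++ [c]) quoted
  | c :: cs, .qD, cur, quoted =>
      if c = '"' then pvLex cs .a cur quoted
      else if c = '\\' then pvLex cs .eQ cur quoted
      else pvLex cs .qD (cur ++ [c]) quoted
  | c :: cs, .eA, cur, quoted => pvLex cs .a (cur ++ [c]) quoted
  | c :: cs, .eQ, cur, quoted =>
      pvLex cs .qD (cur ++ (if c ≠ '\\' ∧ c ≠ '"' then ['\\', c] else [c])) quoted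

def pvShlexSplit (command : String) : Option (List String) :=
  pvLex command.toList .s [] false

-- separators = {"|", "&&", "||", ";"} (a Python set literal)
def pvSeparators : PySem.Set String := PySem.Set.ofList ["|", "&&", "||", ";"]

def pvIsSep (t : String) : Bool := PySem.Set.contains pvSeparators t

-- A's loop body: state = (segments, current)
def pvStepA (st : List (List String) × List String) (token : String) :
    List (List String) × List String :=
  if pvIsSep token then
    if st.2 ≠ [] then (st.1 ++ [st.2], []) else st
  else (st.1, st.2 ++ [token])

def extract_command_segments_py (command : String) : List (List String) :=
  match pvShlexSplit command with
  | none => []  -- except ValueError: return []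
  | some tokens =>
      let r := tokens.foldl pvStepA ([], [])
      if r.2 ≠ [] then r.1 ++ [r.2] else r.1

-- ===== PORT B =====

-- Source B's tokenizer: recursive descent.  _read_double_quoted = pvReadDq,
-- _read_word = pvReadWord, _tokenize = pvTokens; Python's index arithmetic over
-- s becomes recursion over the remaining character list ((word, i) ~ (word, rest));
-- none = the raised ValueError.  s.find("'", i+1) and the slice s[i+1:j] become
-- takeWhile/dropWhile of the remaining list.  The while-loops of _read_word,
-- _tokenize and _segments_of are transcribed with a Nat fuel bounded by the list
-- length (each iteration strictly shortens the list, so the fuel never runs out).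
def pvReadDq : List Char → Option (List Char × List Char)
  | [] => none
  | c :: r =>
    if c = '"' then some ([], r)
    else if c = '\\' then
      match r with
      | [] => none
      | d :: r2 =>
          (pvReadDq r2).map
            (fun p => ((if d = '\\' ∨ d = '"' then [d] else ['\\', d]) ++ p.1, p.2))
    else (pvReadDq r).map (fun p => (c :: p.1, p.2))

def pvReadSq (r : List Char) : Option (List Char × List Char) :=
  if '\'' ∈ r then
    some (r.takeWhile (· ≠ '\''), (r.dropWhile (· ≠ '\'')).tail)
  else none

def pvReadWordF : Nat → List Char → Option (List Char × List Char)
  | 0, _ => none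
  | _ + 1, [] => some ([], [])
  | n + 1, c :: r =>
    if pvIsWs c then some ([], c :: r)
    else if c = '\'' then
      match pvReadSq r with
      | none => none
      | some (w, rest) => (pvReadWordF n rest).map (fun p => (w ++ p.1, p.2))
    else if c = '"' then
      match pvReadDq r with
      | none => none
      | some (w, rest) => (pvReadWordF n rest).map (fun p => (w ++ p.1, p.2))
    else if c = '\\' then
      match r with
      | [] => none
      | d :: r2 => (pvReadWordF n r2).map (fun p => (d :: p.1, p.2))
    else (pvReadWordF n r).map (fun p => (c :: p.1, p.2))

def pvReadWord (l : List Char) : Option (List Char × List Char) :=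
  pvReadWordF (l.length + 1) l

def pvTokensF : Nat → List Char → Option (List String)
  | 0, _ => none
  | _ + 1, [] => some []
  | n + 1, c :: r =>
    if pvIsWs c then pvTokensF n r
    else
      match pvReadWord (c :: r) with
      | none => none
      | some (w, rest) => (pvTokensF n rest).map (String.ofList w :: ·)

def pvTokens (l : List Char) : Option (List String) :=
  pvTokensF (l.length + 1) l

-- Source B's _segments_of: skip a leading separator recursively, otherwise slice off the
-- first maximal non-separator run (takeWhile/dropWhile = the j-loop and the slices), recurse.
def pvSegmentsOfF : Nat → List String → List (List String)
  | 0, _ => []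
  | _ + 1, [] => []
  | n + 1, t :: ts =>
      if pvIsSep t then pvSegmentsOfF n ts
      else
        (t :: ts.takeWhile (fun x => !pvIsSep x)) ::
          pvSegmentsOfF n (ts.dropWhile (fun x => !pvIsSep x))

def pvSegmentsOf (ts : List String) : List (List String) :=
  pvSegmentsOfF (ts.length + 1) ts

def extract_command_segments_py_alt (command : String) : List (List String) :=
  match pvTokens command.toList with
  | none => []  -- except ValueError: return []
  | some tokens => pvSegmentsOf tokens

-- ===== PRECONDITION & SPEC =====
def Spec_extract_command_segments_py (command : String) (out : List (List String)) : Prop := out = extract_command_segments_py_alt command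
instance (command : String) (out : List (List String)) : Decidable (Spec_extract_command_segments_py command out) := by unfold Spec_extract_command_segments_py; infer_instance

-- ===== CLAIM =====
def Claim_equal_extract_command_segments_py : Prop := ∀ (command : String), Dom_extract_command_segments_py command → Spec_extract_command_segments_py command (extract_command_segments_py command)

-- ===== LEMMAS AND PROOFS =====

theorem pvReadSq_len (r : List Char) :
    ∀ w rest, pvReadSq r = some (w, rest) → rest.length ≤ r.length := by
  intro w rest h
  unfold pvReadSq at h
  split_ifs at h with hm
  obtain ⟨rfl, rfl⟩ := Prod.mk.injEq .. ▸ Option.some.inj h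
  calc ((r.dropWhile (· ≠ '\'')).tail).length
      ≤ (r.dropWhile (· ≠ '\'')).length := by
        cases r.dropWhile (· ≠ '\'') <;> simp
    _ ≤ r.length := List.length_dropWhile_le _ _

theorem pvReadDq_len (l : List Char) :
    ∀ w rest, pvReadDq l = some (w, rest) → rest.length ≤ l.length := by
  induction l using pvReadDq.induct with
  | case1 => intro w rest h; simp [pvReadDq] at h
  | case2 r2 =>
      intro w rest h
      rcases r2 with _ | ⟨d2, r3⟩
      · rw [pvReadDq.eq_2, if_pos rfl] at h
        obtain ⟨rfl, rfl⟩ := Prod.mk.injEq .. ▸ Option.some.inj h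
        simp
      · rw [pvReadDq.eq_3, if_pos rfl] at h
        obtain ⟨rfl, rfl⟩ := Prod.mk.injEq .. ▸ Option.some.inj h
        simp
  | case3 _ => intro w rest h; simp [pvReadDq] at h
  | case4 d r2 _ ih =>
      intro w rest h
      rw [pvReadDq.eq_3, if_neg (by decide), if_pos rfl] at h
      cases hq : pvReadDq r2 with
      | none => rw [hq] at h; simp at h
      | some p =>
          rw [hq, Option.map_some] at h
          have hr : p.2 = rest := congrArg Prod.snd (Option.some.inj h)
          subst hr
          have h2 := ih p.1 p.2 (by rw [hq])
          simp only [List.length_cons]; omega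
  | case5 d r2 h1 h2 ih =>
      intro w rest h
      rcases r2 with _ | ⟨d2, r3⟩
      · rw [pvReadDq.eq_2, if_neg h1, if_neg h2, pvReadDq.eq_1] at h
        simp at h
      · rw [pvReadDq.eq_3, if_neg h1, if_neg h2] at h
        cases hq : pvReadDq (d2 :: r3) with
        | none => rw [hq] at h; simp at h
        | some p =>
            rw [hq, Option.map_some] at h
            have hr : p.2 = rest := congrArg Prod.snd (Option.some.inj h)
            subst hr
            have h3 := ih p.1 p.2 (by rw [hq])
            simp only [List.length_cons] at h3 ⊢; omega

theorem pvReadWordF_len : ∀ (n : Nat) (l : List Char) (w rest : List Char),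
    pvReadWordF n l = some (w, rest) → rest.length ≤ l.length := by
  intro n
  induction n with
  | zero => intro l w rest h; simp [pvReadWordF] at h
  | succ n ih =>
      intro l w rest h
      rcases l with _ | ⟨c, r⟩
      · simp only [pvReadWordF, Option.some.injEq] at h
        obtain ⟨rfl, rfl⟩ := Prod.mk.injEq .. ▸ h
        simp
      · simp only [pvReadWordF] at h
        split_ifs at h
        · obtain ⟨rfl, rfl⟩ := Prod.mk.injEq .. ▸ Option.some.inj h; simp
        · split at h
          · simp at h
          · rename_i pw pr heq
            cases hw : pvReadWordF n pr with
            | none => rw [hw] at h; simp at h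
            | some u =>
                rw [hw, Option.map_some] at h
                have hr : u.2 = rest := congrArg Prod.snd (Option.some.inj h)
                subst hr
                have ha := pvReadSq_len r pw pr heq
                have hb := ih pr u.1 u.2 (by rw [hw])
                simp only [List.length_cons]; omega
        · split at h
          · simp at h
          · rename_i pw pr heq
            cases hw : pvReadWordF n pr with
            | none => rw [hw] at h; simp at h
            | some u =>
                rw [hw, Option.map_some] at h
                have hr : u.2 = rest := congrArg Prod.snd (Option.some.inj h)
                subst hr
                have ha := pvReadDq_len r pw pr heq
                have hb := ih pr u.1 u.2 (by rw [hw])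
                simp only [List.length_cons]; omega
        · split at h
          · simp at h
          · rename_i d r2
            cases hw : pvReadWordF n r2 with
            | none => rw [hw] at h; simp at h
            | some u =>
                rw [hw, Option.map_some] at h
                have hr : u.2 = rest := congrArg Prod.snd (Option.some.inj h)
                subst hr
                have hb := ih r2 u.1 u.2 (by rw [hw])
                simp only [List.length_cons]; omega
        · cases hw : pvReadWordF n r with
          | none => rw [hw] at h; simp at h
          | some u =>
              rw [hw, Option.map_some] at h
              have hr : u.2 = rest := congrArg Prod.snd (Option.some.inj h)
              subst hr
              have hb := ih r u.1 u.2 (by rw [hw])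
              simp only [List.length_cons]; omega

theorem pvReadWordF_irrel : ∀ (n m : Nat) (l : List Char),
    l.length < n → l.length < m → pvReadWordF n l = pvReadWordF m l := by
  intro n
  induction n with
  | zero => intro m l hn; omega
  | succ n ih =>
      intro m l hn hm
      rcases m with _ | m
      · omega
      · rcases l with _ | ⟨c, r⟩
        · simp [pvReadWordF]
        · simp only [pvReadWordF]
          simp only [List.length_cons] at hn hm
          by_cases h1 : pvIsWs c = true
          · simp [h1]
          · rw [if_neg h1, if_neg h1]
            by_cases h2 : c = '\''
            · rw [if_pos h2, if_pos h2]
              cases hsq : pvReadSq r with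
              | none => rfl
              | some p =>
                  obtain ⟨pw, pr⟩ := p
                  have ha := pvReadSq_len r pw pr hsq
                  have hi := ih m pr (by omega) (by omega)
                  simp [hi]
            · rw [if_neg h2, if_neg h2]
              by_cases h3 : c = '"'
              · rw [if_pos h3, if_pos h3]
                cases hdq : pvReadDq r with
                | none => rfl
                | some p =>
                    obtain ⟨pw, pr⟩ := p
                    have ha := pvReadDq_len r pw pr hdq
                    have hi := ih m pr (by omega) (by omega)
                    simp [hi]
              · rw [if_neg h3, if_neg h3]
                by_cases h4 : c = '\\'
                · rw [if_pos h4, if_pos h4]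
                  rcases r with _ | ⟨d, r2⟩
                  · rfl
                  · have hi := ih m r2 (by simp at hn; omega)
                      (by simp at hm; omega)
                    simp [hi]
                · rw [if_neg h4, if_neg h4]
                  have hi := ih m r (by omega) (by omega)
                  simp [hi]

-- plain-match unfolding lemmas for the wrapper pvReadWord
theorem pvReadWord_nil : pvReadWord [] = some ([], []) := rfl

theorem pvReadWord_ws (c : Char) (r : List Char) (h : pvIsWs c = true) :
    pvReadWord (c :: r) = some ([], c :: r) := by
  simp [pvReadWord, pvReadWordF, h]

theorem pvReadWord_sq (r : List Char) :
    pvReadWord ('\'' :: r) =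
      (pvReadSq r).elim none
        (fun p => (pvReadWord p.2).map (fun u => (p.1 ++ u.1, u.2))) := by
  unfold pvReadWord
  simp only [List.length_cons, pvReadWordF]
  rw [if_pos trivial]
  cases hsq : pvReadSq r with
  | none => simp [pvIsWs]
  | some p =>
      obtain ⟨pw, pr⟩ := p
      have ha := pvReadSq_len r pw pr hsq
      have hi := pvReadWordF_irrel (r.length + 1) (pr.length + 1) pr
        (by omega) (by omega)
      simp [hi, pvReadWord, pvIsWs]

theorem pvReadWord_dq (r : List Char) :
    pvReadWord ('"' :: r) =
      (pvReadDq r).elim none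
        (fun p => (pvReadWord p.2).map (fun u => (p.1 ++ u.1, u.2))) := by
  unfold pvReadWord
  simp only [List.length_cons, pvReadWordF]
  rw [if_pos trivial]
  cases hdq : pvReadDq r with
  | none => simp [pvIsWs]
  | some p =>
      obtain ⟨pw, pr⟩ := p
      have ha := pvReadDq_len r pw pr hdq
      have hi := pvReadWordF_irrel (r.length + 1) (pr.length + 1) pr
        (by omega) (by omega)
      simp [hi, pvReadWord, pvIsWs]

theorem pvReadWord_esc_nil : pvReadWord ['\\'] = none := by
  simp [pvReadWord, pvReadWordF, pvIsWs]

theorem pvReadWord_esc_cons (d : Char) (r2 : List Char) :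
    pvReadWord ('\\' :: d :: r2) = (pvReadWord r2).map (fun p => (d :: p.1, p.2)) := by
  unfold pvReadWord
  simp only [List.length_cons, pvReadWordF]
  rw [if_pos trivial]
  have hi := pvReadWordF_irrel (r2.length + 1 + 1) (r2.length + 1) r2
    (by omega) (by omega)
  simp [hi, pvIsWs]

theorem pvReadWord_ch (c : Char) (r : List Char) (h1 : pvIsWs c = false)
    (h2 : c ≠ '\'') (h3 : c ≠ '"') (h4 : c ≠ '\\') :
    pvReadWord (c :: r) = (pvReadWord r).map (fun p => (c :: p.1, p.2)) := by
  unfold pvReadWord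
  simp only [List.length_cons, pvReadWordF]
  rw [if_neg (by simp [h1]), if_neg h2, if_neg h3, if_neg h4]

theorem pvReadWord_len (l : List Char) :
    ∀ w rest, pvReadWord l = some (w, rest) → rest.length ≤ l.length :=
  fun w rest h => pvReadWordF_len (l.length + 1) l w rest h

theorem pvReadWord_cons_len (c : Char) (r : List Char) (w rest : List Char)
    (h1 : pvIsWs c = false) (h : pvReadWord (c :: r) = some (w, rest)) :
    rest.length ≤ r.length := by
  by_cases h2 : c = '\''
  · subst h2
    rw [pvReadWord_sq] at h
    cases hsq : pvReadSq r with
    | none => rw [hsq] at h; simp at h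
    | some p =>
        rw [hsq] at h; simp only [Option.elim] at h
        cases hw : pvReadWord p.2 with
        | none => rw [hw] at h; simp at h
        | some u =>
            rw [hw, Option.map_some] at h
            have hr : u.2 = rest := congrArg Prod.snd (Option.some.inj h)
            subst hr
            have ha := pvReadSq_len r p.1 p.2 hsq
            have hb := pvReadWord_len p.2 u.1 u.2 (by rw [hw])
            omega
  · by_cases h3 : c = '"'
    · subst h3
      rw [pvReadWord_dq] at h
      cases hdq : pvReadDq r with
      | none => rw [hdq] at h; simp at h
      | some p =>
          rw [hdq] at h; simp only [Option.elim] at h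
          cases hw : pvReadWord p.2 with
          | none => rw [hw] at h; simp at h
          | some u =>
              rw [hw, Option.map_some] at h
              have hr : u.2 = rest := congrArg Prod.snd (Option.some.inj h)
              subst hr
              have ha := pvReadDq_len r p.1 p.2 hdq
              have hb := pvReadWord_len p.2 u.1 u.2 (by rw [hw])
              omega
    · by_cases h4 : c = '\\'
      · subst h4
        rcases r with _ | ⟨d, r2⟩
        · rw [pvReadWord_esc_nil] at h; simp at h
        · rw [pvReadWord_esc_cons] at h
          cases hw : pvReadWord r2 with
          | none => rw [hw] at h; simp at h
          | some u =>
              rw [hw, Option.map_some] at h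
              have hr : u.2 = rest := congrArg Prod.snd (Option.some.inj h)
              subst hr
              have hb := pvReadWord_len r2 u.1 u.2 (by rw [hw])
              simp only [List.length_cons]; omega
      · rw [pvReadWord_ch c r h1 h2 h3 h4] at h
        cases hw : pvReadWord r with
        | none => rw [hw] at h; simp at h
        | some u =>
            rw [hw, Option.map_some] at h
            have hr : u.2 = rest := congrArg Prod.snd (Option.some.inj h)
            subst hr
            have hb := pvReadWord_len r u.1 u.2 (by rw [hw])
            omega

theorem pvTokensF_irrel : ∀ (n m : Nat) (l : List Char),
    l.length < n → l.length < m → pvTokensF n l = pvTokensF m l := by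
  intro n
  induction n with
  | zero => intro m l hn; omega
  | succ n ih =>
      intro m l hn hm
      rcases m with _ | m
      · omega
      · rcases l with _ | ⟨c, r⟩
        · simp [pvTokensF]
        · simp only [pvTokensF]
          by_cases h1 : pvIsWs c
          · simp only [h1, if_true]
            simp only [List.length_cons] at hn hm
            exact ih m r (by omega) (by omega)
          · simp only [h1, Bool.false_eq_true, if_false]
            cases hw : pvReadWord (c :: r) with
            | none => rfl
            | some p =>
                obtain ⟨pw, pr⟩ := p
                have hb := pvReadWord_cons_len c r pw pr (by simpa using h1)
                  (by rw [hw])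
                simp only [List.length_cons] at hn hm
                have hi := ih m pr (by omega) (by omega)
                simp [hi]

-- unfolding lemmas for the wrapper pvTokens
theorem pvTokens_ws (c : Char) (r : List Char) (h : pvIsWs c = true) :
    pvTokens (c :: r) = pvTokens r := by
  simp [pvTokens, pvTokensF, h]

theorem pvTokens_cons (c : Char) (r : List Char) (h : pvIsWs c = false) :
    pvTokens (c :: r) =
      (pvReadWord (c :: r)).elim none
        (fun p => (pvTokens p.2).map (String.ofList p.1 :: ·)) := by
  unfold pvTokens
  simp only [List.length_cons, pvTokensF]
  rw [if_neg (by simp [h])]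
  cases hw : pvReadWord (c :: r) with
  | none => simp
  | some p =>
      obtain ⟨pw, pr⟩ := p
      have hb := pvReadWord_cons_len c r pw pr h (by rw [hw])
      have hi := pvTokensF_irrel (r.length + 1) (pr.length + 1) pr
        (by omega) (by omega)
      simp [hi, pvTokens]

theorem pvSegmentsOfF_irrel : ∀ (n m : Nat) (ts : List String),
    ts.length < n → ts.length < m → pvSegmentsOfF n ts = pvSegmentsOfF m ts := by
  intro n
  induction n with
  | zero => intro m ts hn; omega
  | succ n ih =>
      intro m ts hn hm
      rcases m with _ | m
      · omega
      · rcases ts with _ | ⟨t, ts⟩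
        · simp [pvSegmentsOfF]
        · simp only [pvSegmentsOfF]
          simp only [List.length_cons] at hn hm
          by_cases hs : pvIsSep t
          · simp only [hs, if_true]
            exact ih m ts (by omega) (by omega)
          · simp only [hs, Bool.false_eq_true, if_false]
            have hd : (ts.dropWhile (fun x => !pvIsSep x)).length ≤ ts.length :=
              List.length_dropWhile_le _ _
            rw [ih m (ts.dropWhile (fun x => !pvIsSep x)) (by omega) (by omega)]

theorem pvSegmentsOf_nil : pvSegmentsOf [] = [] := rfl

theorem pvSegmentsOf_sep_cons (t : String) (ts : List String)
    (h : pvIsSep t = true) : pvSegmentsOf (t :: ts) = pvSegmentsOf ts := by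
  simp [pvSegmentsOf, pvSegmentsOfF, h]

theorem pvSegmentsOf_nonsep_cons (t : String) (ts : List String)
    (h : pvIsSep t = false) :
    pvSegmentsOf (t :: ts) =
      (t :: ts.takeWhile (fun x => !pvIsSep x)) ::
        pvSegmentsOf (ts.dropWhile (fun x => !pvIsSep x)) := by
  unfold pvSegmentsOf
  simp only [List.length_cons, pvSegmentsOfF]
  rw [if_neg (by simp [h])]
  have hd : (ts.dropWhile (fun x => !pvIsSep x)).length ≤ ts.length :=
    List.length_dropWhile_le _ _
  rw [pvSegmentsOfF_irrel (ts.length + 1)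
    ((ts.dropWhile (fun x => !pvIsSep x)).length + 1)
    (ts.dropWhile (fun x => !pvIsSep x)) (by omega) (by omega)]

-- pvLex in its single-quote state is pvReadSq followed by the word state
theorem pvLex_sq_spec (cs : List Char) : ∀ (cur : List Char) (q : Bool),
    pvLex cs .qS cur q =
      (pvReadSq cs).elim none (fun p => pvLex p.2 .a (cur ++ p.1) q) := by
  induction cs with
  | nil => intro cur q; simp [pvReadSq, pvLex]
  | cons c cs ih =>
      intro cur q
      rw [pvLex]
      by_cases hc : c = '\''
      · subst hc
        rw [if_pos rfl]
        have hmem : pvReadSq ('\'' :: cs) = some ([], cs) := by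
          unfold pvReadSq
          rw [if_pos (List.mem_cons_self ..)]
          simp
        rw [hmem]; simp
      · rw [if_neg hc, ih]
        unfold pvReadSq
        by_cases hm : '\'' ∈ cs
        · rw [if_pos (List.mem_cons_of_mem _ hm), if_pos hm]
          have ht : (c :: cs).takeWhile (· ≠ '\'') = c :: cs.takeWhile (· ≠ '\'') := by
            simp [hc]
          have hd : (c :: cs).dropWhile (· ≠ '\'') = cs.dropWhile (· ≠ '\'') := by
            simp [hc]
          rw [ht, hd]; simp
        · rw [if_neg hm, if_neg (by simp [hm]; exact Ne.symm hc)]; simp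

-- pvLex in its double-quote state is pvReadDq followed by the word state
theorem pvReadDq_quote (r : List Char) : pvReadDq ('"' :: r) = some ([], r) := by
  rcases r with _ | ⟨d, r2⟩
  · rw [pvReadDq.eq_2]; simp
  · rw [pvReadDq.eq_3]; simp

theorem pvReadDq_esc_nil : pvReadDq ['\\'] = none := by
  rw [pvReadDq.eq_2]; simp

theorem pvReadDq_esc_cons (d : Char) (r2 : List Char) :
    pvReadDq ('\\' :: d :: r2) =
      (pvReadDq r2).map
        (fun p => ((if d = '\\' ∨ d = '"' then [d] else ['\\', d]) ++ p.1, p.2)) := by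
  rw [pvReadDq.eq_3]; simp

theorem pvReadDq_ch (c : Char) (r : List Char) (h1 : c ≠ '"') (h2 : c ≠ '\\') :
    pvReadDq (c :: r) = (pvReadDq r).map (fun p => (c :: p.1, p.2)) := by
  rcases r with _ | ⟨d, r2⟩
  · rw [pvReadDq.eq_2, if_neg h1, if_neg h2]
  · rw [pvReadDq.eq_3, if_neg h1, if_neg h2]

theorem pvLex_dq_spec_aux : ∀ (n : Nat) (cs : List Char), cs.length ≤ n →
    ∀ (cur : List Char) (q : Bool),
      pvLex cs .qD cur q =
        (pvReadDq cs).elim none (fun p => pvLex p.2 .a (cur ++ p.1) q) := by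
  intro n
  induction n with
  | zero =>
      intro cs hl cur q
      rcases cs with _ | ⟨c, r⟩
      · simp [pvReadDq, pvLex]
      · simp at hl
  | succ n ih =>
      intro cs hl cur q
      rcases cs with _ | ⟨c, r⟩
      · simp [pvReadDq, pvLex]
      · rw [pvLex]
        by_cases h1 : c = '"'
        · subst h1; rw [if_pos rfl, pvReadDq_quote]; simp
        · rw [if_neg h1]
          by_cases h2 : c = '\\'
          · subst h2; rw [if_pos rfl]
            rcases r with _ | ⟨d, r2⟩
            · rw [pvLex, pvReadDq_esc_nil]; simp
            · rw [pvLex, ih r2 (by simp at hl; omega), pvReadDq_esc_cons]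
              cases hq : pvReadDq r2 with
              | none => simp
              | some p =>
                  simp only [Option.map_some, Option.elim]
                  by_cases hd : d = '\\' ∨ d = '"'
                  · have hd' : ¬(d ≠ '\\' ∧ d ≠ '"') := by tauto
                    rw [if_neg hd', if_pos hd]; simp
                  · push_neg at hd
                    rw [if_pos hd, if_neg (by tauto)]; simp
          · rw [if_neg h2, ih r (by simp at hl; omega), pvReadDq_ch c r h1 h2]
            cases hq : pvReadDq r <;> simp

-- pvLex in its word state is pvReadWord followed by the between-words state
theorem pvLex_word_spec_aux : ∀ (n : Nat) (cs : List Char), cs.length ≤ n →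
    ∀ (cur : List Char) (q : Bool), (cur ≠ [] ∨ q = true) →
      pvLex cs .a cur q =
        (pvReadWord cs).elim none
          (fun p => (pvLex p.2 .s [] false).map
            (fun ts => String.ofList (cur ++ p.1) :: ts)) := by
  intro n
  induction n with
  | zero =>
      intro cs hl cur q hq
      rcases cs with _ | ⟨c, r⟩
      · rw [pvLex, pvReadWord_nil, if_pos hq]; simp [pvLex]
      · simp at hl
  | succ n ih =>
      intro cs hl cur q hq
      rcases cs with _ | ⟨c, r⟩
      · rw [pvLex, pvReadWord_nil, if_pos hq]; simp [pvLex]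
      · rw [pvLex]
        by_cases h1 : pvIsWs c = true
        · rw [if_pos h1, pvReadWord_ws c r h1]
          simp only [Option.elim]
          have hfun : (fun rest => if cur ≠ [] ∨ q = true
              then String.ofList cur :: rest else rest) =
              (fun rest => String.ofList cur :: rest) := by
            funext rest; rw [if_pos hq]
          rw [hfun]
          conv_rhs => rw [pvLex]
          rw [if_pos h1]; simp
        · have h1' : pvIsWs c = false := by simpa using h1
          rw [if_neg (by simp [h1'])]
          by_cases h2 : c = '\''
          · subst h2
            rw [if_pos rfl, pvLex_sq_spec, pvReadWord_sq]
            cases hsq : pvReadSq r with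
            | none => simp
            | some p =>
                simp only [Option.elim]
                have hfuel : p.2.length ≤ n := by
                  have := pvReadSq_len r p.1 p.2 hsq
                  simp at hl; omega
                rw [ih p.2 hfuel (cur ++ p.1) true (Or.inr rfl)]
                cases hw : pvReadWord p.2 <;> simp
          · rw [if_neg h2]
            by_cases h3 : c = '"'
            · subst h3
              rw [if_pos rfl, pvLex_dq_spec_aux n r (by simp at hl; omega),
                pvReadWord_dq]
              cases hdq : pvReadDq r with
              | none => simp
              | some p =>
                  simp only [Option.elim]
                  have hfuel : p.2.length ≤ n := by
                    have := pvReadDq_len r p.1 p.2 hdq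
                    simp at hl; omega
                  rw [ih p.2 hfuel (cur ++ p.1) true (Or.inr rfl)]
                  cases hw : pvReadWord p.2 <;> simp
            · rw [if_neg h3]
              by_cases h4 : c = '\\'
              · subst h4
                rw [if_pos rfl]
                rcases r with _ | ⟨d, r2⟩
                · rw [pvLex, pvReadWord_esc_nil]; simp
                · rw [pvLex, ih r2 (by simp at hl; omega) (cur ++ [d]) q
                    (Or.inl (by simp)), pvReadWord_esc_cons]
                  cases hw : pvReadWord r2 <;> simp
              · rw [if_neg h4, ih r (by simp at hl; omega) (cur ++ [c]) q
                  (Or.inl (by simp)), pvReadWord_ch c r h1' h2 h3 h4]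
                cases hw : pvReadWord r <;> simp

-- B's recursive-descent tokenizer computes exactly A's state-machine tokenizer.
theorem pvLex_top_aux : ∀ (n : Nat) (cs : List Char), cs.length ≤ n →
    pvLex cs .s [] false = pvTokens cs := by
  intro n
  induction n with
  | zero =>
      intro cs hl
      rcases cs with _ | ⟨c, r⟩
      · simp [pvLex, pvTokens, pvTokensF]
      · simp at hl
  | succ n ih =>
      intro cs hl
      rcases cs with _ | ⟨c, r⟩
      · simp [pvLex, pvTokens, pvTokensF]
      · by_cases h1 : pvIsWs c = true
        · rw [pvLex, if_pos h1, pvTokens_ws c r h1]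
          exact ih r (by simp at hl; omega)
        · have h1' : pvIsWs c = false := by simpa using h1
          rw [pvTokens_cons c r h1', pvLex, if_neg (by simp [h1'])]
          by_cases h2 : c = '\''
          · subst h2
            rw [if_pos rfl, pvLex_sq_spec, pvReadWord_sq]
            cases hsq : pvReadSq r with
            | none => simp
            | some p =>
                simp only [Option.elim]
                have hp2 := pvReadSq_len r p.1 p.2 hsq
                rw [pvLex_word_spec_aux n p.2 (by simp at hl; omega) ([] ++ p.1)
                  true (Or.inr rfl)]
                cases hw : pvReadWord p.2 with
                | none => simp
                | some u =>
                    have hu2 := pvReadWord_len p.2 u.1 u.2 hw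
                    rw [Option.elim, ih u.2 (by simp at hl; omega)]
                    simp
          · rw [if_neg h2]
            by_cases h3 : c = '"'
            · subst h3
              rw [if_pos rfl, pvLex_dq_spec_aux n r (by simp at hl; omega),
                pvReadWord_dq]
              cases hdq : pvReadDq r with
              | none => simp
              | some p =>
                  simp only [Option.elim]
                  have hp2 := pvReadDq_len r p.1 p.2 hdq
                  rw [pvLex_word_spec_aux n p.2 (by simp at hl; omega) ([] ++ p.1)
                    true (Or.inr rfl)]
                  cases hw : pvReadWord p.2 with
                  | none => simp
                  | some u =>
                      have hu2 := pvReadWord_len p.2 u.1 u.2 hw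
                      rw [Option.elim, ih u.2 (by simp at hl; omega)]
                      simp
            · rw [if_neg h3]
              by_cases h4 : c = '\\'
              · subst h4
                rw [if_pos rfl]
                rcases r with _ | ⟨d, r2⟩
                · rw [pvLex, pvReadWord_esc_nil]; simp
                · rw [pvLex,
                    pvLex_word_spec_aux n r2 (by simp at hl; omega) ([] ++ [d])
                      false (Or.inl (by simp)),
                    pvReadWord_esc_cons]
                  cases hw : pvReadWord r2 with
                  | none => simp
                  | some u =>
                      have hu2 := pvReadWord_len r2 u.1 u.2 hw
                      rw [Option.elim, ih u.2 (by simp at hl; omega)]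
                      simp
              · rw [if_neg h4,
                  pvLex_word_spec_aux n r (by simp at hl; omega) ([] ++ [c])
                    false (Or.inl (by simp)),
                  pvReadWord_ch c r h1' h2 h3 h4]
                cases hw : pvReadWord r with
                | none => simp
                | some u =>
                    have hu2 := pvReadWord_len r u.1 u.2 hw
                    rw [Option.elim, ih u.2 (by simp at hl; omega)]
                    simp

theorem pvTokens_eq_pvLex (cs : List Char) : pvTokens cs = pvLex cs .s [] false :=
  (pvLex_top_aux cs.length cs le_rfl).symm

-- A's loop (from any state) computes: the prior segments, then the segment started by
-- `cur` completed with the next non-separator run, then B's segments of the rest.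
theorem pvLoopA_eq (ts : List String) :
    ∀ (segs : List (List String)) (cur : List String),
      (let r := ts.foldl pvStepA (segs, cur);
        if r.2 ≠ [] then r.1 ++ [r.2] else r.1) =
      segs ++ (if cur = [] then pvSegmentsOf ts
        else (cur ++ ts.takeWhile (fun x => !pvIsSep x)) ::
          pvSegmentsOf (ts.dropWhile (fun x => !pvIsSep x))) := by
  induction ts with
  | nil =>
      intro segs cur
      by_cases hc : cur = [] <;> simp [hc, pvSegmentsOf_nil]
  | cons t ts ih =>
      intro segs cur
      by_cases hs : pvIsSep t = true
      · by_cases hc : cur = []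
        · simp only [List.foldl_cons, pvStepA, hs, if_true, hc]
          simpa [pvSegmentsOf_sep_cons t ts hs] using ih segs []
        · simp only [List.foldl_cons, pvStepA, hs, hc, ne_eq,
            not_false_eq_true, if_pos]
          rw [ih (segs ++ [cur]) []]
          simp [hs, pvSegmentsOf_sep_cons t ts hs]
      · have hs' : pvIsSep t = false := by simpa using hs
        simp only [List.foldl_cons, pvStepA, hs', Bool.false_eq_true, if_false]
        rw [ih segs (cur ++ [t])]
        by_cases hc : cur = [] <;>
          simp [hc, hs', pvSegmentsOf_nonsep_cons t ts hs']

theorem pvTokens_eq_pvShlexSplit (command : String) :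
    pvTokens command.toList = pvShlexSplit command := by
  rw [pvTokens_eq_pvLex]
  unfold pvShlexSplit
  rfl

-- ===== VERDICT =====
theorem extract_command_segments_py_spec : Claim_equal_extract_command_segments_py := by
  intro command _
  unfold Spec_extract_command_segments_py extract_command_segments_py
    extract_command_segments_py_alt
  rw [pvTokens_eq_pvShlexSplit]
  cases pvShlexSplit command with
  | none => rfl
  | some tokens =>
      simpa using pvLoopA_eq tokens [] []
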